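-- pv_equiv track=rewrite | github.com/MitsudoAI/mcp-style-agent | tests/deep_thinking/test_flow_analyzer_standalone.py | _assess_compatibility
-- ===== SOURCE A (Python) =====
-- def _assess_compatibility(changes):
--     """Assess compatibility level"""
--     if not changes:
--         return "full"
--
--     breaking_changes = [
--         change for change in changes if change.get("impact") == "breaking"
--     ]
--     if breaking_changes:
--         return "incompatible"
--
--     high_impact_changes = [
--         change for change in changes if change.get("impact") == "high"
--     ]
--     if high_impact_changes:
--         return "partial"
--
--     return "full"
-- ===== SOURCE B (Python) =====
-- def _assess_compatibility(changes):
--     """Assess compatibility level: one pass with a has_high flag."""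
--     has_high = False
--     for change in changes:
--         impact = change.get("impact")
--         if impact == "breaking":
--             return "incompatible"
--         elif impact == "high":
--             has_high = True
--     return "partial" if has_high else "full"
-- ===== Notes on version B (the rewrite author's own statement) =====
-- stated objective: simpler
-- what changed: Replaced the empty-list guard plus two separate list-comprehension scans with a single early-returning loop carrying a has_high flag.
import Mathlib
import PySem

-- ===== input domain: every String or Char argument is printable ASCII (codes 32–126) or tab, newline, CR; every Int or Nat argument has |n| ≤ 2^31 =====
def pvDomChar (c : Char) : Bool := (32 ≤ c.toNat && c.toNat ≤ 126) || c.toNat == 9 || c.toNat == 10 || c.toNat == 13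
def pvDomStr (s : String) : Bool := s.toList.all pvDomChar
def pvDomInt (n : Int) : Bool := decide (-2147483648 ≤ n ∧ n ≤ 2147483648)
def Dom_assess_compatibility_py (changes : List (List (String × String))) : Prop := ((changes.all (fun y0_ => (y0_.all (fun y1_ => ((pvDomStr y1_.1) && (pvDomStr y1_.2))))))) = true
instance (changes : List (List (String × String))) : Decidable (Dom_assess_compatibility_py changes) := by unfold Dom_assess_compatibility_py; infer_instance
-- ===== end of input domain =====

-- B replaces A's empty guard and two comprehension scans by one early-returning loop with a has_high flag (simpler, same cost).

-- ===== PORT A =====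
-- change.get("impact") on an association-list dict (first match)
def pvGetImpact (c : List (String × String)) : Option String :=
  PySem.Dict.get? ⟨c⟩ "impact"

def assess_compatibility_py (changes : List (List (String × String))) : String :=
  if changes.isEmpty then "full"
  else
    let breaking_changes := changes.filter (fun c => pvGetImpact c == some "breaking")
    if !breaking_changes.isEmpty then "incompatible"
    else
      let high_impact_changes := changes.filter (fun c => pvGetImpact c == some "high")
      if !high_impact_changes.isEmpty then "partial"
      else "full"

-- ===== PORT B =====
def altLoop (changes : List (List (String × String))) (has_high : Bool) : String :=
  match changes with
  | [] => if has_high then "partial" else "full"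
  | c :: rest =>
    let impact := pvGetImpact c
    if impact == some "breaking" then "incompatible"
    else altLoop rest (has_high || impact == some "high")

def assess_compatibility_py_alt (changes : List (List (String × String))) : String :=
  altLoop changes false

-- ===== PRECONDITION & SPEC =====
def Spec_assess_compatibility_py (changes : List (List (String × String))) (out : String) : Prop := out = assess_compatibility_py_alt changes
instance (changes : List (List (String × String))) (out : String) : Decidable (Spec_assess_compatibility_py changes out) := by unfold Spec_assess_compatibility_py; infer_instance

-- ===== CLAIM (what is proved, stated in full; the proofs are below) =====
def Claim_equal_assess_compatibility_py : Prop := ∀ (changes : List (List (String × String))), Dom_assess_compatibility_py changes → Spec_assess_compatibility_py changes (assess_compatibility_py changes)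

-- ===== LEMMAS AND PROOFS =====

-- loop invariant: the single pass decides by "any breaking", then the flag OR "any high"
theorem altLoop_eq (l : List (List (String × String))) (h : Bool) :
    altLoop l h =
      if l.any (fun c => pvGetImpact c == some "breaking") then "incompatible"
      else if h || l.any (fun c => pvGetImpact c == some "high") then "partial"
      else "full" := by
  induction l generalizing h with
  | nil => simp [altLoop]
  | cons c rest ih =>
    simp only [altLoop, List.any_cons, ih]
    by_cases hb : pvGetImpact c == some "breaking" <;>
      by_cases hh : pvGetImpact c == some "high" <;>
        simp [hb, hh]

theorem filter_empty_iff_not_any {α : Type} (l : List α) (p : α → Bool) :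
    (l.filter p).isEmpty = !(l.any p) := by
  induction l with
  | nil => rfl
  | cons a t ih => by_cases h : p a <;> simp [h, ih]

-- ===== VERDICT (by name: the statement is the Claim_ definition above) =====
theorem assess_compatibility_py_spec : Claim_equal_assess_compatibility_py := by
  intro changes _
  show assess_compatibility_py changes = assess_compatibility_py_alt changes
  unfold assess_compatibility_py assess_compatibility_py_alt
  rw [altLoop_eq]
  rcases changes with _ | ⟨c, rest⟩
  · simp
  · simp only [List.isEmpty_cons, Bool.false_eq_true, if_false,
      filter_empty_iff_not_any, Bool.not_not, Bool.false_or]
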